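-- pv_equiv track=rewrite | github.com/ALOHAALOHAALOJHA/FARFAN_MCDPP | audit_evidence_flow_wiring.py | _is_field_in_targets
-- ===== SOURCE A (Python) =====
-- from typing import Any, Dict, List, Set, Tuple
--
-- def _is_field_in_targets(field: str, assembly_targets: Set[str]) -> bool:
--     """Check if validation field exists in assembly targets."""
--     # Direct match
--     if field in assembly_targets:
--         return True
--
--     # Check if field is a nested path of a target
--     for target in assembly_targets:
--         if field.startswith(target + "."):
--             return True
--         if target.startswith(field + "."):
--             return True
--
--     return False
-- ===== SOURCE B (Python) =====
-- def _is_field_in_targets(field, assembly_targets):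
--     """Check if validation field exists in assembly targets."""
--     # Generate every dot-prefix of `field` (including field itself) and look
--     # each one up in the target set; this covers the direct match and every
--     # target that `field` extends.
--     parts = field.split(".")
--     for i in range(len(parts), 0, -1):
--         if ".".join(parts[:i]) in assembly_targets:
--             return True
--     # Residual pass: targets that extend `field`.
--     for target in assembly_targets:
--         if target.startswith(field + "."):
--             return True
--     return False
-- ===== Notes on version B (the rewrite author's own statement) =====
-- stated objective: alternative
-- what changed: Instead of scanning the target set testing two startswith conditions per target, B splits the field on '.' once, generates each dot-prefix of the field and looks it up in the set (covering the direct match and every target the field extends), leaving only a one-condition residual scan for targets that extend the field.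
import Mathlib
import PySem

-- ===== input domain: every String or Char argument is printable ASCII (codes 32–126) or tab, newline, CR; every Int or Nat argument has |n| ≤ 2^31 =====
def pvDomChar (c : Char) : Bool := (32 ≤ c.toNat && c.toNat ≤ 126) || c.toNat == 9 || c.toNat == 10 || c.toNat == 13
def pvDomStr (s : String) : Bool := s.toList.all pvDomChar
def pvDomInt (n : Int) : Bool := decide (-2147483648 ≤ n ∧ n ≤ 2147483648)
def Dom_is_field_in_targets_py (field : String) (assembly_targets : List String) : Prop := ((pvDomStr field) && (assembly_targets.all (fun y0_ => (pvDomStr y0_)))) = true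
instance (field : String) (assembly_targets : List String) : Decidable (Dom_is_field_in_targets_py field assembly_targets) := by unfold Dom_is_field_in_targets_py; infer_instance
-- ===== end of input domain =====

-- B replaces A's two-condition scan of the target set by a different decomposition: it generates
-- every dot-prefix of `field` and looks each one up in the set, keeping only a one-condition
-- residual scan for targets that extend `field` (objective: alternative; same big-O cost).

-- ===== PORT A =====
def is_field_in_targets_py (field : String) (assembly_targets : List String) : Bool :=
  -- 'if field in assembly_targets: return True'  (set membership)
  if assembly_targets.contains field then true
  else
    -- 'for target in assembly_targets: …return True…'  — an order-independent boolean scan,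
    -- so iterating the set as a list is exact
    assembly_targets.any (fun target =>
      PySem.Chars.startswith field.toList (target.toList ++ ['.']) ||
      PySem.Chars.startswith target.toList (field.toList ++ ['.']))

-- ===== PORT B =====
def is_field_in_targets_py_alt (field : String) (assembly_targets : List String) : Bool :=
  let parts := PySem.Chars.splitOn field.toList ['.']
  -- 'for i in range(len(parts), 0, -1): if ".".join(parts[:i]) in assembly_targets: return True'
  if (PySem.List.pyRange (parts.length : Int) 0 (-1)).any (fun i =>
        assembly_targets.any (fun t => t.toList == PySem.Chars.join ['.'] (parts.take i.toNat)))
  then true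
  else
    -- 'for target in assembly_targets: if target.startswith(field + "."): return True'
    assembly_targets.any (fun target =>
      PySem.Chars.startswith target.toList (field.toList ++ ['.']))

-- ===== PRECONDITION & SPEC =====
def Spec_is_field_in_targets_py (field : String) (assembly_targets : List String) (out : Bool) : Prop := out = is_field_in_targets_py_alt field assembly_targets
instance (field : String) (assembly_targets : List String) (out : Bool) : Decidable (Spec_is_field_in_targets_py field assembly_targets out) := by unfold Spec_is_field_in_targets_py; infer_instance

-- ===== CLAIM (what is proved, stated in full; the proofs are below) =====
def Claim_equal_is_field_in_targets_py : Prop := ∀ (field : String) (assembly_targets : List String), Dom_is_field_in_targets_py field assembly_targets → Spec_is_field_in_targets_py field assembly_targets (is_field_in_targets_py field assembly_targets)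

-- ===== LEMMAS AND PROOFS =====

-- Reference single-character split on '.', structural on the string.
def pvSplitDot : List Char → List (List Char)
  | [] => [[]]
  | c :: rest => if c = '.' then [] :: pvSplitDot rest else (pvSplitDot rest).modifyHead (c :: ·)

lemma pvSplitDot_ne_nil (cs : List Char) : pvSplitDot cs ≠ [] := by
  induction cs with
  | nil => simp [pvSplitDot]
  | cons c rest ih =>
    simp only [pvSplitDot]
    split_ifs
    · simp
    · obtain ⟨h0, t0, he⟩ := List.exists_cons_of_ne_nil ih
      simp [he, List.modifyHead]

lemma pvGo_eq (fuel : Nat) : ∀ (l cur : List Char) (acc : List (List Char)), l.length ≤ fuel →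
    PySem.Chars.splitOn.go ['.'] fuel l cur acc
      = acc.reverse ++ (pvSplitDot l).modifyHead (cur.reverse ++ ·) := by
  induction fuel with
  | zero =>
    intro l cur acc h
    have hl : l = [] := List.eq_nil_of_length_eq_zero (Nat.le_zero.mp h)
    subst hl
    rw [PySem.Chars.splitOn.go.eq_def]
    simp [pvSplitDot]
  | succ n ih =>
    intro l cur acc h
    cases l with
    | nil =>
      rw [PySem.Chars.splitOn.go.eq_def]
      simp [pvSplitDot]
    | cons c rest =>
      rw [PySem.Chars.splitOn.go.eq_def]
      by_cases hc : c = '.'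
      · subst hc
        simp only [List.isPrefixOf, BEq.rfl, Bool.true_and, if_pos, List.length_cons,
          List.drop_succ_cons, List.length_nil, List.drop_zero]
        rw [ih rest [] (cur.reverse :: acc) (by simpa using Nat.le_of_succ_le_succ h)]
        obtain ⟨h0, t0, he⟩ := List.exists_cons_of_ne_nil (pvSplitDot_ne_nil rest)
        simp [pvSplitDot, he, List.modifyHead]
      · have hpre : List.isPrefixOf ['.'] (c :: rest) = false := by
          simp [List.isPrefixOf]
          intro hh; exact absurd hh.symm hc
        simp only [hpre, Bool.false_eq_true, if_false, List.length_cons]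
        rw [ih rest (c :: cur) acc (Nat.le_of_succ_le_succ h)]
        simp only [pvSplitDot, if_neg hc]
        obtain ⟨h0, t0, he⟩ := List.exists_cons_of_ne_nil (pvSplitDot_ne_nil rest)
        simp [he, List.modifyHead]

lemma pvSplitOn_eq (cs : List Char) : PySem.Chars.splitOn cs ['.'] = pvSplitDot cs := by
  show PySem.Chars.splitOn.go ['.'] (cs.length + 1) cs [] [] = _
  rw [pvGo_eq (cs.length + 1) cs [] [] (by omega)]
  obtain ⟨h0, t0, he⟩ := List.exists_cons_of_ne_nil (pvSplitDot_ne_nil cs)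
  simp [he, List.modifyHead]

lemma pvJoin_cons (c : Char) (h : List Char) (t : List (List Char)) :
    PySem.Chars.join ['.'] ((c :: h) :: t) = c :: PySem.Chars.join ['.'] (h :: t) := by
  cases t with
  | nil => simp [PySem.Chars.join_singleton]
  | cons q r => rw [PySem.Chars.join_cons_cons, PySem.Chars.join_cons_cons]; simp

-- join of an i-deep prefix of a head-modified split
lemma pvJoin_take_cons (c : Char) (h0 : List Char) (t0 : List (List Char)) (i : Nat) (hi : 1 ≤ i) :
    PySem.Chars.join ['.'] (((c :: h0) :: t0).take i)
      = c :: PySem.Chars.join ['.'] ((h0 :: t0).take i) := by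
  obtain ⟨j, rfl⟩ : ∃ j, i = j + 1 := ⟨i - 1, by omega⟩
  simp only [List.take_succ_cons]
  exact pvJoin_cons c h0 (t0.take j)

lemma pvJoin_take_nil_cons (h0 : List Char) (t0 : List (List Char)) (i : Nat) (hi : 1 ≤ i) :
    PySem.Chars.join ['.'] (([] :: h0 :: t0).take (i + 1))
      = '.' :: PySem.Chars.join ['.'] ((h0 :: t0).take i) := by
  obtain ⟨j, rfl⟩ : ∃ j, i = j + 1 := ⟨i - 1, by omega⟩
  simp only [List.take_succ_cons]
  rw [PySem.Chars.join_cons_cons]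
  simp

-- Characterisation: the dot-prefix joins of the split are exactly `cs` itself and the
-- strings d with d ++ "." a prefix of cs.
lemma pvMain (cs : List Char) : ∀ d : List Char,
    (d = cs ∨ (d ++ ['.']) <+: cs) ↔
    ∃ i : Nat, 1 ≤ i ∧ i ≤ (pvSplitDot cs).length ∧
      d = PySem.Chars.join ['.'] ((pvSplitDot cs).take i) := by
  induction cs with
  | nil =>
    intro d
    constructor
    · rintro (rfl | hp)
      · exact ⟨1, le_refl 1, by simp [pvSplitDot], by simp [pvSplitDot, PySem.Chars.join_singleton]⟩
      · rw [List.prefix_nil] at hp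
        exact absurd hp (by simp)
    · rintro ⟨i, h1, h2, rfl⟩
      simp only [pvSplitDot, List.length_singleton] at h2
      have : i = 1 := le_antisymm h2 h1
      subst this
      left; simp [pvSplitDot, PySem.Chars.join_singleton]
  | cons c rest ih =>
    intro d
    obtain ⟨h0, t0, hS⟩ := List.exists_cons_of_ne_nil (pvSplitDot_ne_nil rest)
    by_cases hc : c = '.'
    · subst hc
      have hsd : pvSplitDot ('.' :: rest) = [] :: h0 :: t0 := by simp [pvSplitDot, hS]
      rw [hsd]
      cases d with
      | nil =>
        constructor
        · intro _
          exact ⟨1, le_refl 1, by simp, by simp [PySem.Chars.join_singleton]⟩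
        · intro _
          right; exact ⟨rest, rfl⟩
      | cons e d' =>
        constructor
        · rintro (he | hp)
          · have he1 : e = '.' := (List.cons_eq_cons.mp he).1
            have he2 : d' = rest := (List.cons_eq_cons.mp he).2
            rw [he1, he2]
            obtain ⟨i, h1, h2, hj⟩ := (ih rest).mp (Or.inl rfl)
            rw [hS] at h2 hj
            refine ⟨i + 1, by omega, by simp only [List.length_cons] at h2 ⊢; omega, ?_⟩
            rw [pvJoin_take_nil_cons h0 t0 i h1, ← hj]
          · rw [List.cons_append] at hp
            obtain ⟨rfl, hp'⟩ := List.cons_prefix_cons.mp hp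
            obtain ⟨i, h1, h2, hj⟩ := (ih d').mp (Or.inr hp')
            rw [hS] at h2 hj
            refine ⟨i + 1, by omega, by simp only [List.length_cons] at h2 ⊢; omega, ?_⟩
            rw [pvJoin_take_nil_cons h0 t0 i h1, ← hj]
        · rintro ⟨i, h1, h2, hj⟩
          by_cases hi1 : i = 1
          · subst hi1
            simp [PySem.Chars.join_singleton] at hj
          · obtain ⟨j, rfl⟩ : ∃ j, i = j + 2 := ⟨i - 2, by omega⟩
            have hjoin := pvJoin_take_nil_cons h0 t0 (j + 1) (by omega)
            have harith : j + 1 + 1 = j + 2 := by omega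
            rw [harith] at hjoin
            rw [hjoin] at hj
            obtain ⟨rfl, hj'⟩ := List.cons_eq_cons.mp hj
            have hr := (ih d').mpr ⟨j + 1, by omega, by rw [hS]; simp at h2 ⊢; omega,
              by rw [hS]; exact hj'⟩
            rcases hr with rfl | hp
            · left; rfl
            · right; rw [List.cons_append]; exact List.cons_prefix_cons.mpr ⟨rfl, hp⟩
    · have hsd : pvSplitDot (c :: rest) = (c :: h0) :: t0 := by
        simp [pvSplitDot, hc, hS, List.modifyHead]
      rw [hsd]
      cases d with
      | nil =>
        constructor
        · rintro (he | hp)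
          · exact absurd he (by simp)
          · simp only [List.nil_append] at hp
            exact absurd (List.cons_prefix_cons.mp hp).1 (fun h => hc h.symm)
        · rintro ⟨i, h1, h2, hj⟩
          rw [pvJoin_take_cons c h0 t0 i h1] at hj
          exact absurd hj (by simp)
      | cons e d' =>
        constructor
        · rintro (he | hp)
          · have he1 : e = c := (List.cons_eq_cons.mp he).1
            have he2 : d' = rest := (List.cons_eq_cons.mp he).2
            rw [he1, he2]
            obtain ⟨i, h1, h2, hj⟩ := (ih rest).mp (Or.inl rfl)
            rw [hS] at h2 hj
            refine ⟨i, h1, by simpa using h2, ?_⟩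
            rw [pvJoin_take_cons c h0 t0 i h1, ← hj]
          · rw [List.cons_append] at hp
            have he1 : e = c := (List.cons_prefix_cons.mp hp).1
            have hp' := (List.cons_prefix_cons.mp hp).2
            rw [he1]
            obtain ⟨i, h1, h2, hj⟩ := (ih d').mp (Or.inr hp')
            rw [hS] at h2 hj
            refine ⟨i, h1, by simpa using h2, ?_⟩
            rw [pvJoin_take_cons c h0 t0 i h1, ← hj]
        · rintro ⟨i, h1, h2, hj⟩
          rw [pvJoin_take_cons c h0 t0 i h1] at hj
          have he1 : e = c := (List.cons_eq_cons.mp hj).1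
          have hj' := (List.cons_eq_cons.mp hj).2
          rw [he1]
          have hr := (ih d').mpr ⟨i, h1, by rw [hS]; simpa using h2, by rw [hS]; exact hj'⟩
          rcases hr with rfl | hp
          · left; rfl
          · right; rw [List.cons_append]; exact List.cons_prefix_cons.mpr ⟨rfl, hp⟩

lemma pvA_iff (field : String) (S : List String) :
    is_field_in_targets_py field S = true ↔
    ∃ t ∈ S, t = field ∨ (t.toList ++ ['.']) <+: field.toList ∨ (field.toList ++ ['.']) <+: t.toList := by
  unfold is_field_in_targets_py
  split_ifs with hmem
  · simp only [true_iff]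
    exact ⟨field, List.contains_iff_mem.mp hmem, Or.inl rfl⟩
  · rw [List.any_eq_true]
    constructor
    · rintro ⟨t, ht, hcond⟩
      rcases Bool.or_eq_true_iff.mp hcond with h | h
      · exact ⟨t, ht, Or.inr (Or.inl ((PySem.Chars.startswith_iff _ _).mp h))⟩
      · exact ⟨t, ht, Or.inr (Or.inr ((PySem.Chars.startswith_iff _ _).mp h))⟩
    · rintro ⟨t, ht, rfl | h | h⟩
      · exact absurd (List.contains_iff_mem.mpr ht) (by simpa using hmem)
      · exact ⟨t, ht, Bool.or_eq_true_iff.mpr (Or.inl ((PySem.Chars.startswith_iff _ _).mpr h))⟩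
      · exact ⟨t, ht, Bool.or_eq_true_iff.mpr (Or.inr ((PySem.Chars.startswith_iff _ _).mpr h))⟩

lemma pvB_iff (field : String) (S : List String) :
    is_field_in_targets_py_alt field S = true ↔
    ((∃ t ∈ S, ∃ i : Nat, 1 ≤ i ∧ i ≤ (pvSplitDot field.toList).length ∧
        t.toList = PySem.Chars.join ['.'] ((pvSplitDot field.toList).take i)) ∨
      ∃ t ∈ S, (field.toList ++ ['.']) <+: t.toList) := by
  unfold is_field_in_targets_py_alt
  simp only [pvSplitOn_eq]
  split_ifs with hpref
  · simp only [true_iff]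
    left
    rw [List.any_eq_true] at hpref
    obtain ⟨i, hi, ht⟩ := hpref
    rw [List.any_eq_true] at ht
    obtain ⟨t, htS, hbeq⟩ := ht
    obtain ⟨hi1, hi2⟩ := PySem.List.mem_pyRange_neg_one.mp hi
    refine ⟨t, htS, i.toNat, by omega, by omega, by simpa using hbeq⟩
  · rw [List.any_eq_true]
    constructor
    · rintro ⟨t, ht, hsw⟩
      exact Or.inr ⟨t, ht, (PySem.Chars.startswith_iff _ _).mp hsw⟩
    · rintro (⟨t, ht, i, h1, h2, hj⟩ | ⟨t, ht, hsw⟩)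
      · exfalso
        apply hpref
        rw [List.any_eq_true]
        refine ⟨(i : Int), PySem.List.mem_pyRange_neg_one.mpr ⟨by exact_mod_cast h1, by exact_mod_cast h2⟩, ?_⟩
        rw [List.any_eq_true]
        exact ⟨t, ht, by simpa using hj⟩
      · exact ⟨t, ht, (PySem.Chars.startswith_iff _ _).mpr hsw⟩

-- ===== VERDICT (by name: the statement is the Claim_ definition above) =====
theorem is_field_in_targets_py_spec : Claim_equal_is_field_in_targets_py := by
  intro field S _
  unfold Spec_is_field_in_targets_py
  rw [Bool.eq_iff_iff, pvA_iff, pvB_iff]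
  constructor
  · rintro ⟨t, ht, rfl | hf | hb⟩
    · exact Or.inl ⟨t, ht, (pvMain t.toList t.toList).mp (Or.inl rfl)⟩
    · exact Or.inl ⟨t, ht, (pvMain field.toList t.toList).mp (Or.inr hf)⟩
    · exact Or.inr ⟨t, ht, hb⟩
  · rintro (⟨t, ht, i, h1, h2, hj⟩ | ⟨t, ht, hb⟩)
    · rcases (pvMain field.toList t.toList).mpr ⟨i, h1, h2, hj⟩ with he | hf
      · exact ⟨t, ht, Or.inl (String.toList_inj.mp he)⟩
      · exact ⟨t, ht, Or.inr (Or.inl hf)⟩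
    · exact ⟨t, ht, Or.inr (Or.inr hb)⟩
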